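-- pv_equiv track=rewrite | github.com/monist-david/knowledge | keyPhrase/noun.py | find_rest_sentence
-- ===== SOURCE A (Python) =====
-- def find_rest_sentence(words_list_copy, existed_index):
--     result = []
--     for i in range(len(words_list_copy)):
--         in_list = False
--         for value in existed_index:
--             if i in value:
--                 in_list = True
--         if not in_list:
--             result.append(i)
--     return result
-- ===== SOURCE B (Python) =====
-- def find_rest_sentence(words_list_copy, existed_index):
--     n = len(words_list_copy)
--     covered = sorted({x for value in existed_index for x in value if 0 <= x < n})
--     result = []
--     prev = 0
--     for c in covered:
--         result.extend(range(prev, c))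
--         prev = c + 1
--     result.extend(range(prev, n))
--     return result
-- ===== Notes on version B (the rewrite author's own statement) =====
-- stated objective: faster
-- what changed: Sort-and-gap-emit: collects the in-range covered indices into a sorted deduplicated list, then emits the uncovered indices as the gaps between consecutive covered values, with no per-index membership test at all.
import Mathlib
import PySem

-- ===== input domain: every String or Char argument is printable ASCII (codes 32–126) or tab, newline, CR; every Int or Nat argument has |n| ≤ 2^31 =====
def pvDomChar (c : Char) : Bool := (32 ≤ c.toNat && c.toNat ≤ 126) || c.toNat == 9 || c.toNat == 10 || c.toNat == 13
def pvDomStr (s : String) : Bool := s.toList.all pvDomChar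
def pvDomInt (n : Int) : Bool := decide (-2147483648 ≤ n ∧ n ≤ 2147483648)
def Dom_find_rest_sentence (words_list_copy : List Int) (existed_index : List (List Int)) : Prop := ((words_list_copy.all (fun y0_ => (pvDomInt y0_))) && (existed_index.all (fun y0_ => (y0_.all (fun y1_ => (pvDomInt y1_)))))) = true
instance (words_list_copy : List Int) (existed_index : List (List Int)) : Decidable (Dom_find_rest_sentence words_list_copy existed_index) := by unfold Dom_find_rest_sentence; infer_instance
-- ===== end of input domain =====

-- B sorts the deduplicated in-range covered indices and emits the uncovered indices as the gaps
-- between consecutive covered values, removing every per-index membership scan (asymptotically faster).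

-- ===== PORT A =====
-- for i in range(len(words_list_copy)): scan every sublist; append i if no sublist contains it
def find_rest_sentence (words_list_copy : List Int) (existed_index : List (List Int)) : List Int :=
  (PySem.List.pyRange 0 (PySem.List.len words_list_copy) 1).foldl
    (fun result i =>
      let in_list := existed_index.foldl (fun b value => if i ∈ value then true else b) false
      if in_list = false then result ++ [i] else result)
    []

-- ===== PORT B =====
-- covered = sorted({x for value in existed_index for x in value if 0 <= x < n});
-- then emit range(prev, c) before each covered c, and range(prev, n) at the end
def find_rest_sentence_alt (words_list_copy : List Int) (existed_index : List (List Int)) : List Int :=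
  let n := PySem.List.len words_list_copy
  let covered := PySem.List.sorted
    (PySem.Set.ofList (existed_index.flatMap (fun value => value.filter (fun x => decide (0 ≤ x ∧ x < n)))))
    (fun x => x) false
  let st := covered.foldl (fun (p : List Int × Int) c => (p.1 ++ PySem.List.pyRange p.2 c 1, c + 1)) ([], 0)
  st.1 ++ PySem.List.pyRange st.2 n 1

-- ===== PRECONDITION & SPEC =====
def Spec_find_rest_sentence (words_list_copy : List Int) (existed_index : List (List Int)) (out : List Int) : Prop := out = find_rest_sentence_alt words_list_copy existed_index
instance (words_list_copy : List Int) (existed_index : List (List Int)) (out : List Int) : Decidable (Spec_find_rest_sentence words_list_copy existed_index out) := by unfold Spec_find_rest_sentence; infer_instance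

-- ===== CLAIM (what is proved, stated in full; the proofs are below) =====
def Claim_equal_find_rest_sentence : Prop := ∀ (words_list_copy : List Int) (existed_index : List (List Int)), Dom_find_rest_sentence words_list_copy existed_index → Spec_find_rest_sentence words_list_copy existed_index (find_rest_sentence words_list_copy existed_index)

-- ===== LEMMAS AND PROOFS =====

-- A's inner scan computes "some sublist contains i"
theorem inlist_eq_any (e : List (List Int)) (i : Int) (b : Bool) :
    e.foldl (fun b value => if i ∈ value then true else b) b
      = (b || e.any (fun value => decide (i ∈ value))) := by
  induction e generalizing b with
  | nil => simp
  | cons v e ih =>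
    simp only [List.foldl_cons, List.any_cons, ih]
    by_cases h : i ∈ v <;> simp [h]

-- A's accumulator loop is a filter
theorem foldl_ifnot_eq_filter (f : Int → Bool) (l : List Int) (acc : List Int) :
    l.foldl (fun result i => if f i = false then result ++ [i] else result) acc
      = acc ++ l.filter (fun i => !f i) := by
  induction l generalizing acc with
  | nil => simp
  | cons x l ih =>
    simp only [List.foldl_cons, List.filter_cons, ih]
    by_cases h : f x <;> simp [h]

-- B's gap-emission over a strictly increasing covered list produces the filtered range
theorem gap_emit_eq_filter (n : Int) (c : List Int) (acc : List Int) (prev : Int)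
    (hs : c.Pairwise (· < ·)) (hb : ∀ x ∈ c, prev ≤ x ∧ x < n) :
    (c.foldl (fun (p : List Int × Int) x => (p.1 ++ PySem.List.pyRange p.2 x 1, x + 1)) (acc, prev)).1
      ++ PySem.List.pyRange
        (c.foldl (fun (p : List Int × Int) x => (p.1 ++ PySem.List.pyRange p.2 x 1, x + 1)) (acc, prev)).2 n 1
      = acc ++ (PySem.List.pyRange prev n 1).filter (fun i => decide (i ∉ c)) := by
  induction c generalizing acc prev with
  | nil =>
    simp [List.filter_eq_self.mpr]
  | cons x xs ih =>
    have hx := hb x (List.mem_cons_self ..)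
    have hpx : prev ≤ x := hx.1
    have hxn : x < n := hx.2
    have hxxs : ∀ y ∈ xs, x < y := by
      intro y hy; exact (List.pairwise_cons.mp hs).1 y hy
    simp only [List.foldl_cons]
    rw [ih (acc ++ PySem.List.pyRange prev x 1) (x + 1) (List.pairwise_cons.mp hs).2
        (fun y hy => ⟨by have := hxxs y hy; omega, (hb y (List.mem_cons_of_mem _ hy)).2⟩)]
    rw [PySem.List.pyRange_one_append prev x n hpx (by omega),
        PySem.List.pyRange_one_cons (show x < n from hxn)]
    simp only [List.filter_append, List.filter_cons, List.append_assoc]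
    have h1 : (PySem.List.pyRange prev x 1).filter (fun i => decide (i ∉ x :: xs))
        = PySem.List.pyRange prev x 1 := by
      apply List.filter_eq_self.mpr
      intro i hi
      have hi' := (PySem.List.mem_pyRange_one).mp hi
      simp only [decide_eq_true_eq, List.mem_cons, not_or]
      exact ⟨by omega, fun hm => by have := hxxs i hm; omega⟩
    have h2 : (PySem.List.pyRange (x+1) n 1).filter (fun i => decide (i ∉ x :: xs))
        = (PySem.List.pyRange (x+1) n 1).filter (fun i => decide (i ∉ xs)) := by
      apply List.filter_congr
      intro i hi
      have hi' := (PySem.List.mem_pyRange_one).mp hi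
      simp only [List.mem_cons, not_or]
      rw [decide_eq_decide]
      constructor
      · rintro ⟨-, h⟩; exact h
      · intro h; exact ⟨by omega, h⟩
    rw [h1, h2]
    simp

-- ===== VERDICT (by name: the statement is the Claim_ definition above) =====
theorem find_rest_sentence_spec : Claim_equal_find_rest_sentence := by
  intro w e _
  show _ = _
  unfold find_rest_sentence find_rest_sentence_alt
  simp only [inlist_eq_any, Bool.false_or, foldl_ifnot_eq_filter, List.nil_append]
  set n := PySem.List.len w with hn
  have hn0 : 0 ≤ n := by simp [hn, PySem.List.len]
  set L := e.flatMap (fun value => value.filter (fun x => decide (0 ≤ x ∧ x < n))) with hL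
  set C := PySem.List.sorted (PySem.Set.ofList L) (fun x => x) false with hC
  have hsC : C.Pairwise (· < ·) := PySem.List.sorted_ofList_pairwise_lt L
  have hmemC : ∀ i, i ∈ C ↔ i ∈ L := by
    intro i
    rw [hC, PySem.List.mem_sorted, PySem.Set.mem_ofList]
  have hbC : ∀ x ∈ C, (0:Int) ≤ x ∧ x < n := by
    intro x hx
    rcases List.mem_flatMap.mp ((hmemC x).mp hx) with ⟨v, -, hv⟩
    have := List.of_mem_filter hv
    simpa using this
  rw [gap_emit_eq_filter n C [] 0 hsC hbC]
  simp only [List.nil_append]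
  apply List.filter_congr
  intro i hi
  have hi' := (PySem.List.mem_pyRange_one).mp hi
  rw [Bool.eq_iff_iff]
  simp only [Bool.not_eq_true', List.any_eq_false, decide_eq_true_eq,
    hmemC, hL, List.mem_flatMap]
  constructor
  · rintro h ⟨v, hv, hm⟩
    exact h v hv (List.mem_of_mem_filter hm)
  · intro h v hv hm
    exact h ⟨v, hv, List.mem_filter.mpr ⟨hm, by simp; omega⟩⟩
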